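-- pv_equiv track=rewrite | github.com/gyeom-yee/problem-solving | 프로그래머스/1/138477. 명예의 전당 （1）/명예의 전당 （1）.py | solution
-- ===== SOURCE A (Python) =====
-- def solution(k, score):
--     answer = []
--     honor = []
--
--     for i in range(len(score)):
--         honor.append(score[i])
--         honor.sort()
--         if i < k:
--             answer.append(honor[0])
--         else:
--             answer.append(honor[-k])
--     return answer
-- ===== SOURCE B (Python) =====
-- def _pos(top, s):
--     # binary search: first index i with s < top[i] in the ascending-sorted list top
--     lo, hi = 0, len(top)
--     while lo < hi:
--         mid = (lo + hi) // 2
--         if top[mid] <= s: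
--             lo = mid + 1
--         else:
--             hi = mid
--     return lo
--
--
-- def solution(k, score):
--     answer = []
--     top = []  # ascending list of the (at most k) highest scores seen so far
--     for s in score:
--         if len(top) < k:
--             top.insert(_pos(top, s), s)
--         elif top[0] < s:
--             top.pop(0)
--             top.insert(_pos(top, s), s)
--         answer.append(top[0])
--     return answer
-- ===== Notes on version B (the rewrite author's own statement) =====
-- stated objective: faster
-- what changed: Instead of re-sorting the whole history every day and indexing the k-th element from the end, B maintains only the current top-k scores as a sorted list of length at most k, updating it with one binary-searched insertion (and eviction of the minimum) per day; the daily answer is that list's head.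
-- outside the precondition, e.g. on solution(0, [1, 2]): A returns [1, 1], B raises IndexError
import Mathlib
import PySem

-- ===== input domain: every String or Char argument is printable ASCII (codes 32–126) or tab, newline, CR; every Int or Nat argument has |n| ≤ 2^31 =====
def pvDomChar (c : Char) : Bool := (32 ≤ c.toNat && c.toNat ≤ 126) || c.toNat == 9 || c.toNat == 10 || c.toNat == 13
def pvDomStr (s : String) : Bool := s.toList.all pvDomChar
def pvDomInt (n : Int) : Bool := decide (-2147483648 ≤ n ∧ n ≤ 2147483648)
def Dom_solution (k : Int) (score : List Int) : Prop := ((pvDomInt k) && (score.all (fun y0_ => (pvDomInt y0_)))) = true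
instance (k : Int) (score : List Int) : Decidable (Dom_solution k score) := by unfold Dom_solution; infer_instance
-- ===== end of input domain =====

-- B maintains only the current top-k scores in a sorted list (one binary-searched insertion per day)
-- instead of A's daily full re-sort; the daily answer is that list's head (its minimum).

-- ===== PORT A =====
-- loop body of A: honor.append(score[i]); honor.sort(); answer.append(honor[0] / honor[-k])
-- score[i] is in range for every i from range(len(score)), so pyGetD's default is unreachable;
-- honor[-k] raises IndexError outside Pre_solution (k ≤ 0) — those inputs are excluded below.
def stepA (k : Int) (score : List Int) (st : List Int × List Int) (i : Int) : List Int × List Int :=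
  let honor := PySem.List.sorted (st.2 ++ [PySem.List.pyGetD score i 0]) (fun x => x)
  if i < k then
    (st.1 ++ [PySem.List.pyGetD honor 0 0], honor)
  else
    (st.1 ++ [PySem.List.pyGetD honor (-k) 0], honor)

def solution (k : Int) (score : List Int) : List Int :=
  ((PySem.List.pyRange 0 (score.length : Int)).foldl (stepA k score) ([], [])).1

-- ===== PORT B =====
-- _pos's while loop: binary search for the first index i with s < top[i]; lo, hi are
-- nonnegative Python ints, modelled as Nat ((lo+hi)//2 agrees with Nat division);
-- top[mid] always has 0 <= mid < len(top) here, so getD's default is unreachable.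
def bpos (top : List Int) (s : Int) (lo hi : Nat) : Nat :=
  if _h : lo < hi then
    if top.getD ((lo + hi) / 2) 0 ≤ s then bpos top s ((lo + hi) / 2 + 1) hi
    else bpos top s lo ((lo + hi) / 2)
  else lo
termination_by hi - lo
decreasing_by all_goals omega

-- loop body of B: top.insert(i, s) with 0 ≤ i ≤ len is exactly insertIdx, and top.pop(0)
-- (used for its effect only) is drop 1; top[0] on an empty top (only reachable when k ≤ 0)
-- raises in Python and is excluded by Pre_solution, so headD's default is unreachable.
def stepB (k : Int) (st : List Int × List Int) (s : Int) : List Int × List Int :=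
  let top := st.2
  if (top.length : Int) < k then
    let t := top.insertIdx (bpos top s 0 top.length) s
    (st.1 ++ [t.headD 0], t)
  else if top.headD 0 < s then
    let t := (top.drop 1).insertIdx (bpos (top.drop 1) s 0 (top.drop 1).length) s
    (st.1 ++ [t.headD 0], t)
  else
    (st.1 ++ [top.headD 0], top)

def solution_alt (k : Int) (score : List Int) : List Int :=
  (score.foldl (stepB k) ([], [])).1

-- ===== PRECONDITION & SPEC =====
-- Pre_ excludes k ≤ 0 with a nonempty score: for k < 0 A raises IndexError on honor[-k], and for
-- k = 0 A's value (the running minimum, from honor[-0] = honor[0]) is an artefact of Python's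
-- index negation on which B raises; on an empty score both return [] for every k.
def Pre_solution (k : Int) (score : List Int) : Prop := 1 ≤ k ∨ score = []
instance (k : Int) (score : List Int) : Decidable (Pre_solution k score) := by
  unfold Pre_solution; infer_instance

def pvWitness_solution : Int × List Int := (2, [10, 20, 5])

def Spec_solution (k : Int) (score : List Int) (out : List Int) : Prop := out = solution_alt k score
instance (k : Int) (score : List Int) (out : List Int) : Decidable (Spec_solution k score out) := by unfold Spec_solution; infer_instance

-- ===== CLAIM (what is proved, stated in full; the proofs are below) =====
def Claim_equal_solution : Prop := ∀ (k : Int) (score : List Int), Dom_solution k score → Pre_solution k score → Spec_solution k score (solution k score)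

-- ===== LEMMAS AND PROOFS =====

-- proof-side recursive form of _insert
def insAux (top : List Int) (s : Int) : List Int :=
  match top with
  | [] => [s]
  | t :: ts => if s < t then s :: t :: ts else t :: insAux ts s

-- the insertion point, characterised: everything before it is ≤ s, the element at it is > s
def posChar (top : List Int) (s : Int) (p : Nat) : Prop :=
  p ≤ top.length ∧ (∀ j, j < p → top.getD j 0 ≤ s) ∧ (p < top.length → s < top.getD p 0)

lemma bpos_char (top : List Int) (s : Int) (hs : top.Pairwise (· ≤ ·)) :
    ∀ (n lo hi : Nat), hi - lo ≤ n → hi ≤ top.length → lo ≤ hi →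
      (∀ j, j < lo → top.getD j 0 ≤ s) →
      (∀ j, hi ≤ j → j < top.length → s < top.getD j 0) →
      posChar top s (bpos top s lo hi) := by
  have mono : ∀ i j : Nat, i ≤ j → j < top.length → top.getD i 0 ≤ top.getD j 0 := by
    intro i j hij hj
    rcases Nat.lt_or_ge i j with hlt | hge
    · rw [List.getD_eq_getElem top 0 (by omega), List.getD_eq_getElem top 0 hj]
      exact List.pairwise_iff_getElem.mp hs i j (by omega) hj hlt
    · have : i = j := by omega
      rw [this]
  intro n
  induction n with
  | zero =>
    intro lo hi h0 hhi hlo hbelow habove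
    rw [bpos, dif_neg (by omega)]
    exact ⟨by omega, hbelow, fun hp => habove _ (by omega) hp⟩
  | succ n ih =>
    intro lo hi h0 hhi hlo hbelow habove
    rw [bpos]
    by_cases hlt : lo < hi
    · rw [dif_pos hlt]
      by_cases hc : top.getD ((lo + hi) / 2) 0 ≤ s
      · rw [if_pos hc]
        refine ih ((lo + hi) / 2 + 1) hi (by omega) hhi (by omega) ?_ habove
        intro j hj
        exact le_trans (mono j ((lo + hi) / 2) (by omega) (by omega)) hc
      · rw [if_neg hc]
        refine ih lo ((lo + hi) / 2) (by omega) (by omega) (by omega) hbelow ?_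
        intro j hj hjl
        exact lt_of_lt_of_le (not_le.mp hc) (mono ((lo + hi) / 2) j hj hjl)
    · rw [dif_neg hlt]
      exact ⟨by omega, hbelow, fun hp => habove _ (by omega) hp⟩

lemma insertIdx_posChar (top : List Int) (s : Int) (p : Nat) (hp : posChar top s p) :
    top.insertIdx p s = insAux top s := by
  induction top generalizing p with
  | nil =>
    obtain ⟨h1, -, -⟩ := hp
    have hp0 : p = 0 := by simpa using h1
    subst hp0
    rfl
  | cons t ts ih =>
    obtain ⟨h1, h2, h3⟩ := hp
    by_cases hst : s < t
    · have hp0 : p = 0 := by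
        by_contra hne
        exact absurd (h2 0 (by omega)) (by simpa using not_le.mpr hst)
      rw [hp0, List.insertIdx_zero]
      rw [show insAux (t :: ts) s = if s < t then s :: t :: ts else t :: insAux ts s from rfl,
        if_pos hst]
    · cases p with
      | zero => exact absurd (h3 (by simp)) (by simpa using hst)
      | succ p' =>
        rw [List.insertIdx_succ_cons,
          show insAux (t :: ts) s = if s < t then s :: t :: ts else t :: insAux ts s from rfl,
          if_neg hst, ih p' ⟨by simpa using h1, fun j hj => h2 (j + 1) (by omega),
            fun hp => h3 (by simpa using hp)⟩]

-- the port of _insert on a sorted list is exactly one ordered insertion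
lemma insertAt_sorted (top : List Int) (s : Int) (hs : top.Pairwise (· ≤ ·)) :
    top.insertIdx (bpos top s 0 top.length) s = insAux top s := by
  refine insertIdx_posChar top s _ (bpos_char top s hs top.length 0 top.length (by omega)
    le_rfl (by omega) (fun j hj => by omega) (fun j hj hjl => by omega))

lemma insAux_ne_nil (top : List Int) (s : Int) : insAux top s ≠ [] := by
  cases top with
  | nil => simp [insAux]
  | cons t ts => unfold insAux; split <;> simp

lemma insAux_length (top : List Int) (s : Int) : (insAux top s).length = top.length + 1 := by
  induction top with
  | nil => rfl
  | cons t ts ih => unfold insAux; split <;> simp [ih]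

lemma insAux_perm (top : List Int) (s : Int) : (insAux top s).Perm (top ++ [s]) := by
  induction top with
  | nil => rfl
  | cons t ts ih =>
    unfold insAux
    split
    · exact List.perm_append_singleton s (t :: ts) |>.symm
    · exact (ih.cons t).trans (by rfl)

lemma insAux_pairwise (top : List Int) (s : Int) (hs : top.Pairwise (· ≤ ·)) :
    (insAux top s).Pairwise (· ≤ ·) := by
  induction top with
  | nil => simp [insAux]
  | cons t ts ih =>
    rcases List.pairwise_cons.mp hs with ⟨hall, hts⟩
    unfold insAux
    split
    · refine List.pairwise_cons.mpr ⟨?_, hs⟩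
      intro y hy
      rcases List.mem_cons.mp hy with rfl | hy
      · omega
      · exact le_trans (by omega) (hall y hy)
    · refine List.pairwise_cons.mpr ⟨?_, ih hts⟩
      intro y hy
      have := (insAux_perm ts s).mem_iff.mp hy
      rcases List.mem_append.mp this with hy' | hy'
      · exact hall y hy'
      · simp at hy'; omega

lemma insAux_of_le (top : List Int) (s : Int) (hs : top.Pairwise (· ≤ ·))
    (hall : ∀ y ∈ top, s ≤ y) : insAux top s = s :: top := by
  induction top with
  | nil => rfl
  | cons t ts ih =>
    unfold insAux
    split
    · rfl
    · rename_i hlt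
      have hts : t = s := le_antisymm (not_lt.mp hlt) (hall t (by simp))
      rcases List.pairwise_cons.mp hs with ⟨hall', hts'⟩
      have := ih hts' (fun y hy => hall y (List.mem_cons_of_mem t hy))
      rw [this, hts]

lemma insAux_drop_of_le (top : List Int) (s : Int) (d : Nat) (hd : d < top.length)
    (hs : top.Pairwise (· ≤ ·)) (hle : s ≤ top[d]) :
    (insAux top s).drop (d + 1) = top.drop d := by
  induction top generalizing d with
  | nil => simp at hd
  | cons t ts ih =>
    rcases List.pairwise_cons.mp hs with ⟨hall, hts⟩
    unfold insAux
    split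
    · simp
    · rename_i hlt
      cases d with
      | zero =>
        have hst : s = t := le_antisymm (by simpa using hle) (not_lt.mp hlt)
        have h2 : insAux ts s = s :: ts := by
          refine insAux_of_le ts s hts (fun y hy => ?_)
          rw [hst]; exact hall y hy
        rw [List.drop_succ_cons, List.drop_zero, List.drop_zero, h2, hst]
      | succ d' =>
        have : (t :: insAux ts s).drop (d' + 2) = (insAux ts s).drop (d' + 1) := by simp
        rw [this, ih d' (by simpa using hd) hts (by simpa using hle)]
        simp

lemma insAux_drop_of_lt (top : List Int) (s : Int) (d : Nat) (hd : d < top.length)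
    (hs : top.Pairwise (· ≤ ·)) (hlt : top[d] < s) :
    (insAux top s).drop (d + 1) = insAux (top.drop (d + 1)) s := by
  induction top generalizing d with
  | nil => simp at hd
  | cons t ts ih =>
    rcases List.pairwise_cons.mp hs with ⟨hall, hts⟩
    have hts' : t ≤ s := by
      cases d with
      | zero => exact le_of_lt (by simpa using hlt)
      | succ d' =>
        have hd' : d' < ts.length := by simpa using hd
        exact le_of_lt (lt_of_le_of_lt (hall ts[d'] (ts.getElem_mem hd')) (by simpa using hlt))
    rw [show insAux (t :: ts) s = if s < t then s :: t :: ts else t :: insAux ts s from rfl,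
      if_neg (not_lt.mpr hts')]
    cases d with
    | zero => simp
    | succ d' =>
      have : (t :: insAux ts s).drop (d' + 2) = (insAux ts s).drop (d' + 1) := by simp
      rw [this, ih d' (by simpa using hd) hts (by simpa using hlt)]
      simp

-- Python's stable sort of (sorted prefix ++ [new]) is exactly one insertion
lemma sorted_snoc (h : List Int) (s : Int) (hs : h.Pairwise (· ≤ ·)) :
    PySem.List.sorted (h ++ [s]) (fun x => x) = insAux h s :=
  PySem.List.sorted_id_eq_of_perm_of_pairwise _ _ (insAux_perm h s) (insAux_pairwise h s hs)

lemma headD_eq_getD (t : List Int) : t.headD 0 = t.getD 0 0 := by cases t <;> rfl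

lemma headD_drop (h : List Int) (m : Nat) (hm : m < h.length) :
    (h.drop m).headD 0 = h[m] := by
  rw [List.drop_eq_getElem_cons hm]; rfl

-- the joint loop invariant: equal answers, A's honor = sorted prefix, B's top = last k of it
lemma main_inv (k : Int) (hk : 1 ≤ k) (score : List Int) :
    (((PySem.List.pyRange 0 (score.length : Int)).foldl (stepA k score) ([], [])).1
        = (score.foldl (stepB k) ([], [])).1)
    ∧ (((PySem.List.pyRange 0 (score.length : Int)).foldl (stepA k score) ([], [])).2
        = PySem.List.sorted score (fun x => x))
    ∧ ((score.foldl (stepB k) ([], [])).2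
        = (PySem.List.sorted score (fun x => x)).drop
            ((PySem.List.sorted score (fun x => x)).length - k.toNat)) := by
  induction score using List.reverseRecOn with
  | nil => simp [PySem.List.sorted]
  | append_singleton xs s ih =>
    obtain ⟨ihans, ihh, iht⟩ := ih
    set h := PySem.List.sorted xs (fun x => x) with hh
    have hsorted : h.Pairwise (· ≤ ·) := PySem.List.sorted_pairwise xs _
    have hlen : h.length = xs.length := PySem.List.length_sorted xs _ _
    set L := h.length with hL
    set kn := k.toNat with hkn
    have hkn1 : 1 ≤ kn := by omega
    have hkcast : (kn : Int) = k := by omega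
    -- split A's range and rewrite the prefix fold back to score = xs
    have hrange : PySem.List.pyRange 0 ((xs ++ [s]).length : Int)
        = PySem.List.pyRange 0 (xs.length : Int) ++ [(xs.length : Int)] := by
      have : ((xs ++ [s]).length : Int) = (xs.length : Int) + 1 := by simp
      rw [this, PySem.List.pyRange_one_succ_right (by positivity)]
    have hcongr : (PySem.List.pyRange 0 (xs.length : Int)).foldl (stepA k (xs ++ [s])) ([], [])
        = (PySem.List.pyRange 0 (xs.length : Int)).foldl (stepA k xs) ([], []) := by
      apply PySem.List.foldl_congr_mem
      intro acc i hi
      have hi' := PySem.List.mem_pyRange_one.mp hi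
      obtain ⟨n, rfl⟩ : ∃ n : Nat, (n : Int) = i := ⟨i.toNat, by omega⟩
      have hn : n < xs.length := by exact_mod_cast hi'.2
      unfold stepA
      rw [PySem.List.pyGetD_natCast, PySem.List.pyGetD_natCast,
        List.getD_append xs [s] 0 n hn]
    have hgetlast : PySem.List.pyGetD (xs ++ [s]) ((xs.length : Int)) 0 = s := by
      rw [PySem.List.pyGetD_natCast]
      simp [List.getD]
    -- state after the common prefix
    have hA : (PySem.List.pyRange 0 ((xs ++ [s]).length : Int)).foldl (stepA k (xs ++ [s])) ([], [])
        = stepA k (xs ++ [s])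
            ((PySem.List.pyRange 0 (xs.length : Int)).foldl (stepA k xs) ([], []))
            ((xs.length : Int)) := by
      rw [hrange, List.foldl_append, hcongr]; rfl
    have hB : (xs ++ [s]).foldl (stepB k) ([], [])
        = stepB k (xs.foldl (stepB k) ([], [])) s := by
      rw [List.foldl_append]; rfl
    -- the one-step analysis
    set st := (PySem.List.pyRange 0 (xs.length : Int)).foldl (stepA k xs) ([], []) with hst
    set sb := xs.foldl (stepB k) ([], []) with hsb
    have htop : sb.2 = h.drop (L - kn) := iht
    have hhonor : PySem.List.sorted (st.2 ++ [PySem.List.pyGetD (xs ++ [s]) ((xs.length : Int)) 0]) (fun x => x)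
        = insAux h s := by
      rw [hgetlast, ihh, sorted_snoc h s hsorted]
    have hsorted' : PySem.List.sorted (xs ++ [s]) (fun x => x) = insAux h s := by
      rw [← sorted_snoc h s hsorted]
      exact PySem.List.sorted_eq_sorted_of_perm _ _ _ (fun a b hab => hab)
        ((PySem.List.sorted_perm xs (fun x => x) false).append_right [s]).symm
    have hlen' : (insAux h s).length = L + 1 := insAux_length h s
    rw [hA, hB, hsorted']
    simp only [stepA, stepB]
    rw [hhonor, htop]
    have hsortedTop : (h.drop (L - kn)).Pairwise (· ≤ ·) := hsorted.drop
    rw [insertAt_sorted _ s hsortedTop, insertAt_sorted _ s hsortedTop.drop]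
    by_cases hcase : (xs.length : Int) < k
    · -- fewer than k scores so far: top is the whole sorted prefix
      have hLk : L < kn := by omega
      have hdrop0 : L - kn = 0 := by omega
      have htoplen : ((h.drop (L - kn)).length : Int) < k := by
        simp [hdrop0]; omega
      rw [if_pos hcase, if_pos htoplen]
      dsimp only
      have hd0 : (insAux (h.drop (L - kn)) s).headD 0 = PySem.List.pyGetD (insAux h s) 0 0 := by
        rw [hdrop0, List.drop_zero, headD_eq_getD, PySem.List.pyGetD_zero]
      refine ⟨by rw [ihans, hd0], rfl, ?_⟩
      rw [hdrop0, List.drop_zero, hlen']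
      have h0 : L + 1 - kn = 0 := by omega
      rw [h0, List.drop_zero]
    · -- at least k scores: B's top has exactly k elements, its head is the k-th largest
      have hLk : kn ≤ L := by omega
      have hdn : L - kn < L := by omega
      have htoplen : ¬ (((h.drop (L - kn)).length : Int) < k) := by
        simp; omega
      have hhead : (h.drop (L - kn)).headD 0 = h[L - kn] := headD_drop h (L - kn) hdn
      have hAidx : PySem.List.pyGetD (insAux h s) (-k) 0 = (insAux h s)[L + 1 - kn]'(by omega) := by
        conv_lhs => rw [show -k = -((kn : Int)) from by omega]
        rw [PySem.List.pyGetD_neg_natCast (insAux h s) kn 0 (by omega) (by omega)]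
        simp [hlen']
      have hsucc : L + 1 - kn = (L - kn) + 1 := by omega
      rw [if_neg hcase, if_neg htoplen]
      by_cases hlt : h[L - kn]'hdn < s
      · -- the new score enters the top k, evicting its minimum
        rw [if_pos (by rw [hhead]; exact hlt)]
        dsimp only
        have hdrop : (insAux h s).drop (L + 1 - kn) = insAux (h.drop ((L - kn) + 1)) s := by
          rw [hsucc]; exact insAux_drop_of_lt h s (L - kn) hdn hsorted hlt
        have hd1 : (h.drop (L - kn)).drop 1 = h.drop ((L - kn) + 1) := by
          rw [List.drop_drop]
        have hne : (insAux h s).drop (L + 1 - kn) ≠ [] := by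
          rw [hdrop]; exact insAux_ne_nil _ _
        have hheads : (insAux (h.drop ((L - kn) + 1)) s).headD 0
            = (insAux h s)[L + 1 - kn]'(by omega) := by
          rw [← hdrop, List.drop_eq_getElem_cons (by omega)]; rfl
        refine ⟨?_, rfl, ?_⟩
        · rw [ihans, hd1, hheads, hAidx]
        · rw [hd1, ← hdrop, hlen']
      · -- the new score does not reach the top k: top unchanged
        rw [if_neg (by rw [hhead]; exact hlt)]
        dsimp only
        have hdrop : (insAux h s).drop (L + 1 - kn) = h.drop (L - kn) := by
          rw [hsucc]; exact insAux_drop_of_le h s (L - kn) hdn hsorted (not_lt.mp hlt)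
        have hheads : (h.drop (L - kn)).headD 0 = (insAux h s)[L + 1 - kn]'(by omega) := by
          rw [← hdrop, List.drop_eq_getElem_cons (by omega)]; rfl
        refine ⟨?_, rfl, ?_⟩
        · rw [ihans, hheads, hAidx]
        · rw [← hdrop, hlen']

-- ===== VERDICT (by name: the statement is the Claim_ definition above) =====
theorem solution_spec : Claim_equal_solution := by
  intro k score _hdom hpre
  unfold Spec_solution
  rcases hpre with hk | rfl
  · exact (main_inv k hk score).1
  · rfl
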